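-- pv_equiv track=rewrite | github.com/0Xrry/FUGIO | Analyzer/chain.py | _get_param_cnt_range
-- ===== SOURCE A (Python) =====
-- def _get_param_cnt_range(param_list):
--     min_cnt = len(param_list)
--     max_cnt = len(param_list)
--     default_list = []
--     for param, default in sorted(param_list.items(),
--                                  key=lambda x: (x[1]['INDEX'])):
--         if default['DEFAULT'] is None:
--             default_list.append(False)
--         else:
--             default_list.append(True)
--
--     for default in default_list[::-1]:
--         if default:
--             min_cnt -= 1
--         else:
--             break
--     return range(min_cnt, max_cnt+1)
-- ===== SOURCE B (Python) =====
-- def _get_param_cnt_range(param_list):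
--     last = -1
--     for i, (param, spec) in enumerate(sorted(param_list.items(),
--                                              key=lambda x: (x[1]['INDEX']))):
--         if spec['DEFAULT'] is None:
--             last = i
--     return range(last + 1, len(param_list) + 1)
-- ===== Notes on version B (the rewrite author's own statement) =====
-- stated objective: simpler
-- what changed: Replaces A's boolean default_list plus reversed trailing-run loop with a single enumerate pass over the same stable-sorted items that records the index of the last parameter whose DEFAULT is None, giving min_cnt = last+1 directly.
-- outside the precondition, e.g. on _get_param_cnt_range({'a': {'INDEX': None, 'DEFAULT': 1}}): A returns [0, 1], B returns [0, 1]
import Mathlib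
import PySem

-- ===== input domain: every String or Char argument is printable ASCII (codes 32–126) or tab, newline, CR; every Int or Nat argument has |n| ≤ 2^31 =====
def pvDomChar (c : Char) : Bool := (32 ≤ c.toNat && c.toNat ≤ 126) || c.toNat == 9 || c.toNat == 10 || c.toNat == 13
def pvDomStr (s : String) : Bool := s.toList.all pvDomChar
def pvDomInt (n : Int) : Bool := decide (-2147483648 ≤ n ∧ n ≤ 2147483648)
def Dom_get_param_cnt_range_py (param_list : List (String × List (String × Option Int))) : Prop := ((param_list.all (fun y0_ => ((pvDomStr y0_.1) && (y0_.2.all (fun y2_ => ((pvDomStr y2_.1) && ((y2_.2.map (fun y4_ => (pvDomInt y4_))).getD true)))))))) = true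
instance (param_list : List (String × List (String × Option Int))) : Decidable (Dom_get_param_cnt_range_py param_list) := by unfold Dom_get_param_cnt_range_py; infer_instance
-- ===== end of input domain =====

-- B replaces A's boolean list + reversed trailing-run loop by one enumerate pass over the
-- same stable-sorted items recording the last parameter whose DEFAULT is None (simpler).

-- shared sort key: x[1]['INDEX'] (under Pre_ the key is present with an int value)
def pvIndexKey (p : String × List (String × Option Int)) : Int :=
  ((List.lookup "INDEX" p.2).getD none).getD 0

-- ===== PORT A =====
-- the second loop 'for default in default_list[::-1]: …' with break, as structural recursion
def pvTrimLoop : List Bool → Int → Int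
  | [], m => m
  | true :: t, m => pvTrimLoop t (m - 1)
  | false :: _, m => m

def get_param_cnt_range_py (param_list : List (String × List (String × Option Int))) : List Int :=
  let min_cnt : Int := param_list.length
  let max_cnt : Int := param_list.length
  let default_list : List Bool :=
    (PySem.List.sorted param_list pvIndexKey false).foldl
      (fun acc p =>
        if (List.lookup "DEFAULT" p.2).getD none = none then acc ++ [false]
        else acc ++ [true]) []
  -- default_list[::-1] ported as List.reverse (exact for the full-reverse slice)
  let min_cnt := pvTrimLoop default_list.reverse min_cnt
  PySem.List.pyRange min_cnt (max_cnt + 1) 1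

-- ===== PORT B =====
def get_param_cnt_range_py_alt (param_list : List (String × List (String × Option Int))) : List Int :=
  let last : Int :=
    (PySem.List.enumerate (PySem.List.sorted param_list pvIndexKey false) 0).foldl
      (fun last ip =>
        if (List.lookup "DEFAULT" ip.2.2).getD none = none then ip.1 else last) (-1)
  PySem.List.pyRange (last + 1) ((param_list.length : Int) + 1) 1

-- ===== PRECONDITION & SPEC =====
-- Pre_ excludes inputs on which A raises (a missing 'INDEX' or 'DEFAULT' key → KeyError,
-- a None 'INDEX' compared during sorting → TypeError) and, as defensible corners,
-- duplicate-key association lists (which no Python dict can present) together with the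
-- degenerate one-entry dict whose 'INDEX' is None (sorting one item never compares it).
def Pre_get_param_cnt_range_py (param_list : List (String × List (String × Option Int))) : Prop :=
  (param_list.map Prod.fst).Nodup ∧
  ∀ p ∈ param_list,
    (p.2.map Prod.fst).Nodup ∧
    (List.lookup "INDEX" p.2).getD none ≠ none ∧
    List.lookup "DEFAULT" p.2 ≠ none
instance (param_list : List (String × List (String × Option Int))) : Decidable (Pre_get_param_cnt_range_py param_list) := by unfold Pre_get_param_cnt_range_py; infer_instance

def pvWitness_get_param_cnt_range_py : (List (String × List (String × Option Int))) :=
  [("a", [("INDEX", some 0), ("DEFAULT", none)]), ("b", [("INDEX", some 1), ("DEFAULT", some 3)])]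

def Spec_get_param_cnt_range_py (param_list : List (String × List (String × Option Int))) (out : List Int) : Prop := out = get_param_cnt_range_py_alt param_list
instance (param_list : List (String × List (String × Option Int))) (out : List Int) : Decidable (Spec_get_param_cnt_range_py param_list out) := by unfold Spec_get_param_cnt_range_py; infer_instance

-- ===== CLAIM (what is proved, stated in full; the proofs are below) =====
def Claim_equal_get_param_cnt_range_py : Prop := ∀ (param_list : List (String × List (String × Option Int))), Dom_get_param_cnt_range_py param_list → Pre_get_param_cnt_range_py param_list → Spec_get_param_cnt_range_py param_list (get_param_cnt_range_py param_list)

-- ===== LEMMAS AND PROOFS =====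

-- A's boolean-accumulating first loop is a map over the sorted list
theorem pvFoldAppend_eq_map (s : List (String × List (String × Option Int))) (acc : List Bool) :
    s.foldl (fun acc p =>
        if (List.lookup "DEFAULT" p.2).getD none = none then acc ++ [false]
        else acc ++ [true]) acc
      = acc ++ s.map (fun p => !decide ((List.lookup "DEFAULT" p.2).getD none = none)) := by
  induction s generalizing acc with
  | nil => simp
  | cons h t ih =>
    by_cases hc : (List.lookup "DEFAULT" h.2).getD none = none <;>
      simp [List.foldl_cons, hc, ih]

-- core: trimming the trailing run of defaults = (last index with DEFAULT None) + 1
theorem pvTrim_eq_last (s : List (String × List (String × Option Int))) :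
    pvTrimLoop ((s.map (fun p => !decide ((List.lookup "DEFAULT" p.2).getD none = none))).reverse)
        (s.length : Int)
      = (PySem.List.enumerate s 0).foldl
          (fun last ip =>
            if (List.lookup "DEFAULT" ip.2.2).getD none = none then ip.1 else last) (-1) + 1 := by
  induction s using List.reverseRecOn with
  | nil => simp [pvTrimLoop]
  | append_singleton t x ih =>
    rw [List.map_append, List.reverse_append, PySem.List.enumerate_append, List.foldl_append]
    by_cases hc : (List.lookup "DEFAULT" x.2).getD none = none
    · simp [hc, pvTrimLoop, PySem.List.enumerate]
    · simpa [hc, pvTrimLoop] using ih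

-- ===== VERDICT (by name: the statement is the Claim_ definition above) =====
theorem get_param_cnt_range_py_spec : Claim_equal_get_param_cnt_range_py := by
  intro pl _ _
  show get_param_cnt_range_py pl = get_param_cnt_range_py_alt pl
  unfold get_param_cnt_range_py get_param_cnt_range_py_alt
  dsimp only
  rw [pvFoldAppend_eq_map, List.nil_append]
  have h := pvTrim_eq_last (PySem.List.sorted pl pvIndexKey false)
  rw [PySem.List.length_sorted] at h
  rw [h]
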